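-- pv_equiv track=rewrite | github.com/satishDodda3/main | asg6/RNAfolding1.py | rna_folding
-- ===== SOURCE A (Python) =====
-- def compute_opt(sequence, i, j, memo, pair):
--     if j - i <= 4:
--         return 0
--     if memo[i][j] is not None:
--         return memo[i][j]
--
--     memo[i][j] = compute_opt(sequence, i, j - 1, memo, pair)
--     for t in range(i, j - 4):
--         if sequence[t] == pair.get(sequence[j], ''):
--             score = 1 + compute_opt(sequence, i, t - 1, memo, pair) + compute_opt(sequence, t + 1, j - 1, memo, pair)
--             if score > memo[i][j]:
--                 memo[i][j] = score
--                 memo[j][i] = t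
--     return memo[i][j]
--
-- def rna_folding(sequence):
--     n = len(sequence)
--     memo = [[None] * n for _ in range(n)]
--     pair = {'A': 'U', 'U': 'A', 'C': 'G', 'G': 'C'}
--     compute_opt(sequence, 0, n - 1, memo, pair)
--
--     def get_pairs(i, j):
--         if j - i <= 4 or memo[i][j] is None:
--             return []
--         if memo[j][i] is not None:
--             t = memo[j][i]
--             return [(t, j)] + get_pairs(i, t - 1) + get_pairs(t + 1, j - 1)
--         return get_pairs(i, j - 1)
--
--     pairs = get_pairs(0, n - 1)
--     return pairs, memo[0][n - 1]
-- ===== SOURCE B (Python) =====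
-- # Bottom-up Nussinov tabulation (dicts for value/split tables) instead of A's
-- # memoized recursion; identical recurrence and tie-breaking, same traceback.
-- def rna_folding(sequence):
--     n = len(sequence)
--     pair = {'A': 'U', 'U': 'A', 'C': 'G', 'G': 'C'}
--     val = {}
--     split = {}
--     for L in range(5, n):
--         for i in range(0, n - L):
--             j = i + L
--             best = val.get((i, j - 1), 0)
--             s = None
--             for t in range(i, j - 4):
--                 if sequence[t] == pair.get(sequence[j], ''):
--                     score = 1 + val.get((i, t - 1), 0) + val.get((t + 1, j - 1), 0)
--                     if score > best:
--                         best = score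
--                         s = t
--             val[(i, j)] = best
--             if s is not None:
--                 split[(i, j)] = s
--
--     def get_pairs(i, j):
--         if j - i <= 4:
--             return []
--         if (i, j) in split:
--             t = split[(i, j)]
--             return [(t, j)] + get_pairs(i, t - 1) + get_pairs(t + 1, j - 1)
--         return get_pairs(i, j - 1)
--
--     return get_pairs(0, n - 1), val.get((0, n - 1))
-- ===== Notes on version B (the rewrite author's own statement) =====
-- stated objective: alternative
-- what changed: Replaces A's top-down memoized recursion (a shared memo mutated through recursive calls, with split indices stored in the mirrored half of the matrix) by a bottom-up Nussinov tabulation that fills a value table and a separate split table with two nested loops over substring length and start index, followed by the same traceback; the recurrence and the strict greater-than, last-improving-split tie-breaking are identical.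
import Mathlib
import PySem

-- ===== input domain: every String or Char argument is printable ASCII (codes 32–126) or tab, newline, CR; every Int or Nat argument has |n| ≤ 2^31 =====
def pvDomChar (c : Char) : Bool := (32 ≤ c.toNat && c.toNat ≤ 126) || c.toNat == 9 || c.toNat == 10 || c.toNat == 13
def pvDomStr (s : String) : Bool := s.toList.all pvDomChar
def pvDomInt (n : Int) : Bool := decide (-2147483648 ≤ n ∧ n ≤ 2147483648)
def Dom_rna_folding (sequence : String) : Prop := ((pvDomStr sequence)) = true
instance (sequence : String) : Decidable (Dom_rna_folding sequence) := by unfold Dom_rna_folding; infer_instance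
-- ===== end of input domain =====

-- B replaces A's memoized recursion by a bottom-up Nussinov tabulation (value and
-- split tables built by loops over substring length); same recurrence, tie-breaking
-- and traceback, so the returned value is identical (objective: alternative).

-- ===== PORT A =====
abbrev pvMemo : Type := PySem.Dict (Int × Int) Int

def pvPair : PySem.Dict Char Char := PySem.Dict.ofList [('A','U'),('U','A'),('C','G'),('G','C')]

-- sequence[t] == pair.get(sequence[j], ''): both Pythons contain this exact expression.
-- Out-of-range indices are never reached on executed paths; a missing pair key gives
-- '' which never equals a 1-character string, hence `false`.
def pvMatch (s : List Char) (t j : Int) : Bool :=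
  match PySem.List.pyGet? s t, PySem.List.pyGet? s j with
  | some a, some b =>
    match pvPair.get? b with
    | some c => a == c
    | none => false
  | _, _ => false

-- Python's memo (an n×n list-of-lists initialised to None) as a dict keyed by
-- (row, col); a missing key is exactly a None entry.  All executed accesses use
-- in-range non-negative indices.
def computeOpt (s : List Char) (i j : Int) (m : pvMemo) : Int × pvMemo :=
  if _hbase : j - i ≤ 4 then (0, m)
  else
    match m.get? (i, j) with
    | some v => (v, m)
    | none =>
      let r0 := computeOpt s i (j - 1) m
      let m1 := r0.2.insert (i, j) r0.1
      let mF := (PySem.List.pyRange i (j - 4) 1).attach.foldl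
        (fun mc tt =>
          if pvMatch s tt.1 j then
            let ra := computeOpt s i (tt.1 - 1) mc
            let rb := computeOpt s (tt.1 + 1) (j - 1) ra.2
            let score := 1 + ra.1 + rb.1
            match rb.2.get? (i, j) with
            | some cur => if score > cur then (rb.2.insert (i, j) score).insert (j, i) tt.1 else rb.2
            | none => rb.2      -- unreachable: (i, j) was written before the loop
          else mc) m1
      (mF.getD (i, j) 0, mF)    -- Python: return memo[i][j]; (i, j) is always present here
termination_by (j - i).toNat
decreasing_by
  · omega
  · have h := (PySem.List.mem_pyRange_one).1 tt.2
    omega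
  · have h := (PySem.List.mem_pyRange_one).1 tt.2
    omega

-- get_pairs; the fuel only makes the recursion total, it is never exhausted on
-- executed paths (the recursion depth is bounded by j - i + 1 ≤ len(sequence))
def getPairsA (m : pvMemo) (fuel : Nat) (i j : Int) : List (Int × Int) :=
  match fuel with
  | 0 => []
  | fuel + 1 =>
    if j - i ≤ 4 then []
    else match m.get? (i, j) with
    | none => []
    | some _ =>
      match m.get? (j, i) with
      | some t => (t, j) :: (getPairsA m fuel i (t - 1) ++ getPairsA m fuel (t + 1) (j - 1))
      | none => getPairsA m fuel i (j - 1)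

def rna_folding (sequence : String) : (List (Int × Int)) × Option Int :=
  let s := sequence.toList
  let n : Int := PySem.List.len s
  let r := computeOpt s 0 (n - 1) PySem.Dict.empty
  (getPairsA r.2 (s.length + 1) 0 (n - 1), r.2.get? (0, n - 1))

-- ===== PORT B =====
-- bottom-up tabulation: val table and split table built over increasing lengths
def pvTables (s : List Char) (n : Int) : pvMemo × pvMemo :=
  (PySem.List.pyRange 5 n 1).foldl (fun tabs L =>
    (PySem.List.pyRange 0 (n - L) 1).foldl (fun tabs i =>
      let j := i + L
      let bs := (PySem.List.pyRange i (j - 4) 1).foldl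
        (fun (acc : Int × Option Int) t =>
          if pvMatch s t j then
            let score := 1 + tabs.1.getD (i, t - 1) 0 + tabs.1.getD (t + 1, j - 1) 0
            if score > acc.1 then (score, some t) else acc
          else acc)
        (tabs.1.getD (i, j - 1) 0, (none : Option Int))
      (tabs.1.insert (i, j) bs.1,
       match bs.2 with
       | some t => tabs.2.insert (i, j) t
       | none => tabs.2)) tabs)
    (PySem.Dict.empty, PySem.Dict.empty)

-- traceback from the split table; fuel as in getPairsA
def getPairsB (sd : pvMemo) (fuel : Nat) (i j : Int) : List (Int × Int) :=
  match fuel with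
  | 0 => []
  | fuel + 1 =>
    if j - i ≤ 4 then []
    else match sd.get? (i, j) with
    | some t => (t, j) :: (getPairsB sd fuel i (t - 1) ++ getPairsB sd fuel (t + 1) (j - 1))
    | none => getPairsB sd fuel i (j - 1)

def rna_folding_alt (sequence : String) : (List (Int × Int)) × Option Int :=
  let s := sequence.toList
  let n : Int := PySem.List.len s
  let tabs := pvTables s n
  (getPairsB tabs.2 (s.length + 1) 0 (n - 1), tabs.1.get? (0, n - 1))

-- ===== PRECONDITION & SPEC =====
-- Pre_ excludes only the empty string, on which A raises IndexError (memo[0][-1] on an empty memo).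
def Pre_rna_folding (sequence : String) : Prop := sequence ≠ ""
instance (sequence : String) : Decidable (Pre_rna_folding sequence) := by unfold Pre_rna_folding; infer_instance
def pvWitness_rna_folding : String := "GCAUCUAUGC"

def Spec_rna_folding (sequence : String) (out : (List (Int × Int)) × Option Int) : Prop := out = rna_folding_alt sequence
instance (sequence : String) (out : (List (Int × Int)) × Option Int) : Decidable (Spec_rna_folding sequence out) := by unfold Spec_rna_folding; infer_instance

-- ===== CLAIM (what is proved, stated in full; the proofs are below) =====
def Claim_equal_rna_folding : Prop := ∀ (sequence : String), Dom_rna_folding sequence → Pre_rna_folding sequence → Spec_rna_folding sequence (rna_folding sequence)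

-- ===== LEMMAS AND PROOFS =====

-- the Nussinov recurrence as a pure function: value and (last improving) split index
def optR (s : List Char) (i j : Int) : Int × Option Int :=
  if _hbase : j - i ≤ 4 then (0, none)
  else
    (PySem.List.pyRange i (j - 4) 1).attach.foldl
      (fun (acc : Int × Option Int) tt =>
        if pvMatch s tt.1 j then
          (if 1 + (optR s i (tt.1 - 1)).1 + (optR s (tt.1 + 1) (j - 1)).1 > acc.1
           then (1 + (optR s i (tt.1 - 1)).1 + (optR s (tt.1 + 1) (j - 1)).1, some tt.1) else acc)
        else acc)
      ((optR s i (j - 1)).1, none)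
termination_by (j - i).toNat
decreasing_by
  · have h := (PySem.List.mem_pyRange_one).1 tt.2
    omega
  · have h := (PySem.List.mem_pyRange_one).1 tt.2
    omega
  · omega

-- the loop body of optR, named (identical to the body in optR's definition)
def gSpec (s : List Char) (i j : Int) :
    (Int × Option Int) → {x // x ∈ PySem.List.pyRange i (j - 4) 1} → (Int × Option Int) :=
  fun acc tt =>
    if pvMatch s tt.1 j then
      (if 1 + (optR s i (tt.1 - 1)).1 + (optR s (tt.1 + 1) (j - 1)).1 > acc.1
       then (1 + (optR s i (tt.1 - 1)).1 + (optR s (tt.1 + 1) (j - 1)).1, some tt.1) else acc)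
    else acc

theorem optR_base (s : List Char) (i j : Int) (h : j - i ≤ 4) : optR s i j = (0, none) := by
  rw [optR]; simp [h]

theorem optR_fold (s : List Char) (i j : Int) (h : ¬ j - i ≤ 4) :
    optR s i j =
      (PySem.List.pyRange i (j - 4) 1).attach.foldl (gSpec s i j) ((optR s i (j - 1)).1, none) := by
  conv_lhs => rw [optR]
  rw [dif_neg h]
  rfl

theorem gSpec_fold_snd (s : List Char) (i j : Int) :
    ∀ (l : List {x // x ∈ PySem.List.pyRange i (j - 4) 1}) (acc : Int × Option Int),
      (∀ t, acc.2 = some t → i ≤ t ∧ t < j - 4) →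
      (∀ t, (l.foldl (gSpec s i j) acc).2 = some t → i ≤ t ∧ t < j - 4) := by
  intro l
  induction l with
  | nil => intro acc h; exact h
  | cons tt rest ih =>
    intro acc h
    simp only [List.foldl_cons]
    apply ih
    intro t ht
    unfold gSpec at ht
    by_cases hm : pvMatch s tt.1 j
    · rw [if_pos hm] at ht
      by_cases hs : (1 + (optR s i (tt.1 - 1)).1 + (optR s (tt.1 + 1) (j - 1)).1) > acc.1
      · rw [if_pos hs] at ht
        simp only at ht
        cases ht
        exact (PySem.List.mem_pyRange_one).1 tt.2
      · rw [if_neg hs] at ht; exact h t ht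
    · rw [if_neg hm] at ht; exact h t ht

theorem optR_split_mem (s : List Char) (i j t : Int) (h : (optR s i j).2 = some t) :
    i ≤ t ∧ t < j - 4 := by
  by_cases hb : j - i ≤ 4
  · rw [optR_base s i j hb] at h; simp at h
  · rw [optR_fold s i j hb] at h
    exact gSpec_fold_snd s i j _ _ (by intro t ht; simp at ht) t h

-- presence-only monotone growth of a memo
def Grows (m m' : pvMemo) : Prop :=
  ∀ k : Int × Int, (m.get? k).isSome = true → (m'.get? k).isSome = true

theorem Grows_refl (m : pvMemo) : Grows m m := fun _ h => h

theorem Grows_trans {m m' m'' : pvMemo} (h1 : Grows m m') (h2 : Grows m' m'') : Grows m m'' :=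
  fun k h => h2 k (h1 k h)

theorem Grows_insert (m : pvMemo) (k : Int × Int) (v : Int) : Grows m (m.insert k v) := by
  intro k' h
  by_cases hk : k' = k
  · subst hk; simp [PySem.Dict.get?_insert_self]
  · rwa [PySem.Dict.get?_insert_of_ne _ _ hk]

-- every cell the traceback can visit is present in the memo
def Reach (s : List Char) (m : pvMemo) (i j : Int) : Prop :=
  4 < j - i →
    ((m.get? (i, j)).isSome = true) ∧
    (∀ t, (optR s i j).2 = some t → Reach s m i (t - 1) ∧ Reach s m (t + 1) (j - 1)) ∧
    ((optR s i j).2 = none → Reach s m i (j - 1))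
termination_by (j - i).toNat
decreasing_by
  · have := optR_split_mem s i j t (by assumption)
    omega
  · have := optR_split_mem s i j t (by assumption)
    omega
  · omega

theorem Reach_of_le (s : List Char) (m : pvMemo) (i j : Int) (h : j - i ≤ 4) :
    Reach s m i j := by
  rw [Reach]; intro h4; omega

theorem Reach_mono (s : List Char) {m m' : pvMemo} (hg : Grows m m') :
    ∀ i j : Int, Reach s m i j → Reach s m' i j := by
  intro i j
  generalize hk : (j - i).toNat = k
  induction k using Nat.strong_induction_on generalizing i j with
  | _ k ih =>
    intro hr
    rw [Reach]
    intro h4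
    rw [Reach] at hr
    obtain ⟨h1, h2, h3⟩ := hr h4
    refine ⟨hg _ h1, ?_, ?_⟩
    · intro t ht
      have hb := optR_split_mem s i j t ht
      obtain ⟨ha, hbb⟩ := h2 t ht
      exact ⟨ih ((t - 1 - i).toNat) (by omega) i (t - 1) rfl ha,
             ih ((j - 1 - (t + 1)).toNat) (by omega) (t + 1) (j - 1) rfl hbb⟩
    · intro ht
      exact ih ((j - 1 - i).toNat) (by omega) i (j - 1) rfl (h3 ht)

-- every PRESENT value/split cell (outside the exception set P) is correct
def SoundE (s : List Char) (m : pvMemo) (P : Int → Int → Prop) : Prop :=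
  ∀ a b : Int, 4 < b - a → ¬ P a b → ((m.get? (a, b)).isSome = true) →
    m.get? (a, b) = some (optR s a b).1 ∧ m.get? (b, a) = (optR s a b).2 ∧ Reach s m a b

-- split keys exist only where value keys do
def Coupled (m : pvMemo) : Prop :=
  ∀ a b : Int, 4 < b - a → ((m.get? (b, a)).isSome = true) → ((m.get? (a, b)).isSome = true)

theorem SoundE_weaken (s : List Char) (m : pvMemo) {P Q : Int → Int → Prop}
    (h : SoundE s m P) (hpq : ∀ a b, P a b → Q a b) : SoundE s m Q := by
  intro a b h4 hq hp
  exact h a b h4 (fun hPab => hq (hpq a b hPab)) hp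

theorem SoundE_insert (s : List Char) (m : pvMemo) (P : Int → Int → Prop) (i j : Int)
    (hij : 4 < j - i) (hexc : P i j) (k : Int × Int) (hk : k = (i, j) ∨ k = (j, i)) (v : Int)
    (h : SoundE s m P) : SoundE s (m.insert k v) P := by
  intro a b h4 hPab hsome
  have hab : (a, b) ≠ k := by
    rcases hk with rfl | rfl
    · intro he; injection he with e1 e2; subst e1; subst e2; exact hPab hexc
    · intro he; injection he with e1 e2; omega
  have hba : (b, a) ≠ k := by
    rcases hk with rfl | rfl
    · intro he; injection he with e1 e2; omega
    · intro he; injection he with e1 e2; subst e1; subst e2; exact hPab hexc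
  rw [PySem.Dict.get?_insert_of_ne _ _ hab] at hsome ⊢
  rw [PySem.Dict.get?_insert_of_ne _ _ hba]
  obtain ⟨h1, h2, h3⟩ := h a b h4 hPab hsome
  exact ⟨h1, h2, Reach_mono s (Grows_insert m k v) a b h3⟩

theorem Coupled_insert_le (m : pvMemo) (x y : Int) (hxy : x ≤ y) (v : Int)
    (h : Coupled m) : Coupled (m.insert (x, y) v) := by
  intro a b h4 hsome
  have hba : (b, a) ≠ (x, y) := by intro he; injection he with e1 e2; omega
  rw [PySem.Dict.get?_insert_of_ne _ _ hba] at hsome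
  exact Grows_insert m (x, y) v (a, b) (h a b h4 hsome)

theorem Coupled_insert_rev (m : pvMemo) (x y : Int) (hxy : y < x) (v : Int)
    (hpres : (m.get? (y, x)).isSome = true)
    (h : Coupled m) : Coupled (m.insert (x, y) v) := by
  intro a b h4 hsome
  by_cases hba : (b, a) = (x, y)
  · injection hba with e1 e2; subst e1; subst e2
    exact Grows_insert m (b, a) v (a, b) hpres
  · rw [PySem.Dict.get?_insert_of_ne _ _ hba] at hsome
    exact Grows_insert m (x, y) v (a, b) (h a b h4 hsome)

-- the loop body of computeOpt, named (identical to the body in computeOpt's definition)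
def pvF (s : List Char) (i j : Int) :
    pvMemo → {x // x ∈ PySem.List.pyRange i (j - 4) 1} → pvMemo :=
  fun mc tt =>
    if pvMatch s tt.1 j then
      let ra := computeOpt s i (tt.1 - 1) mc
      let rb := computeOpt s (tt.1 + 1) (j - 1) ra.2
      let score := 1 + ra.1 + rb.1
      match rb.2.get? (i, j) with
      | some cur => if score > cur then (rb.2.insert (i, j) score).insert (j, i) tt.1 else rb.2
      | none => rb.2
    else mc

theorem computeOpt_base (s : List Char) (i j : Int) (m : pvMemo) (h : j - i ≤ 4) :
    computeOpt s i j m = (0, m) := by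
  rw [computeOpt]; simp [h]

theorem computeOpt_hit (s : List Char) (i j : Int) (m : pvMemo) (v : Int)
    (h : ¬ j - i ≤ 4) (hv : m.get? (i, j) = some v) :
    computeOpt s i j m = (v, m) := by
  rw [computeOpt]; simp [h, hv]

theorem computeOpt_miss (s : List Char) (i j : Int) (m : pvMemo)
    (h : ¬ j - i ≤ 4) (hv : m.get? (i, j) = none) :
    computeOpt s i j m =
      (((PySem.List.pyRange i (j - 4) 1).attach.foldl (pvF s i j)
          ((computeOpt s i (j - 1) m).2.insert (i, j) (computeOpt s i (j - 1) m).1)).getD (i, j) 0,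
       ((PySem.List.pyRange i (j - 4) 1).attach.foldl (pvF s i j)
          ((computeOpt s i (j - 1) m).2.insert (i, j) (computeOpt s i (j - 1) m).1))) := by
  rw [computeOpt]; simp [h, hv, pvF]

theorem computeOpt_correct (s : List Char) :
    ∀ (N : Nat) (i j : Int) (m : pvMemo) (P : Int → Int → Prop),
    (j - i).toNat ≤ N →
    SoundE s m P → Coupled m →
    (∀ a b : Int, P a b → ¬ (i ≤ a ∧ b ≤ j ∧ 4 < b - a)) →
    (computeOpt s i j m).1 = (optR s i j).1 ∧
    SoundE s (computeOpt s i j m).2 P ∧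
    Coupled (computeOpt s i j m).2 ∧
    Grows m (computeOpt s i j m).2 ∧
    (∀ a b : Int, ¬ (i ≤ a ∧ a ≤ j ∧ i ≤ b ∧ b ≤ j) →
      (computeOpt s i j m).2.get? (a, b) = m.get? (a, b)) ∧
    (4 < j - i →
      (computeOpt s i j m).2.get? (i, j) = some (optR s i j).1 ∧
      (computeOpt s i j m).2.get? (j, i) = (optR s i j).2 ∧
      Reach s (computeOpt s i j m).2 i j) := by
  intro N
  induction N with
  | zero =>
    intro i j m P hN hS hC hP
    have hb : j - i ≤ 4 := by omega
    rw [computeOpt_base s i j m hb, optR_base s i j hb]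
    exact ⟨rfl, hS, hC, Grows_refl m, fun a b _ => rfl, by omega⟩
  | succ N IH =>
    intro i j m P hN hS hC hP
    by_cases hb : j - i ≤ 4
    · rw [computeOpt_base s i j m hb, optR_base s i j hb]
      exact ⟨rfl, hS, hC, Grows_refl m, fun a b _ => rfl, by omega⟩
    have h4 : 4 < j - i := by omega
    have hPij : ¬ P i j := fun hp => hP i j hp ⟨le_refl i, le_refl j, h4⟩
    cases hget : m.get? (i, j) with
    | some v =>
      rw [computeOpt_hit s i j m v hb hget]
      obtain ⟨h1, h2, h3⟩ := hS i j h4 hPij (by rw [hget]; rfl)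
      have hv : v = (optR s i j).1 := by rw [hget] at h1; injection h1
      exact ⟨hv, hS, hC, Grows_refl m, fun a b _ => rfl, fun _ => ⟨h1, h2, h3⟩⟩
    | none =>
      have ihTop := IH i (j - 1) m P (by omega) hS hC
        (fun a b hp => by
          have := hP a b hp
          intro ⟨x, y, z⟩; exact this ⟨x, by omega, z⟩)
      obtain ⟨ih1, ih2, ih3, ih4, ih5, ih6⟩ := ihTop
      set r0 := computeOpt s i (j - 1) m with hr0
      set m1 : pvMemo := r0.2.insert (i, j) r0.1 with hm1
      set P' : Int → Int → Prop := fun a b => P a b ∨ (a = i ∧ b = j) with hP'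
      have hP'ij : P' i j := Or.inr ⟨rfl, rfl⟩
      have h0ij : r0.2.get? (i, j) = none := by
        rw [ih5 i j (by omega)]; exact hget
      have hm1ij : m1.get? (i, j) = some r0.1 := PySem.Dict.get?_insert_self _ _ _
      have hne_ji_ij : ((j, i) : Int × Int) ≠ (i, j) := by
        intro he; injection he with e1 e2; omega
      have h0ji : r0.2.get? (j, i) = none := by
        cases hji : r0.2.get? (j, i) with
        | none => rfl
        | some w =>
          exfalso
          have := ih3 i j h4 (by rw [hji]; rfl)
          rw [h0ij] at this; exact absurd this (by simp)
      have hm1ji : m1.get? (j, i) = none := by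
        rw [hm1, PySem.Dict.get?_insert_of_ne _ _ hne_ji_ij]; exact h0ji
      have hS1 : SoundE s m1 P' :=
        SoundE_insert s r0.2 P' i j h4 hP'ij (i, j) (Or.inl rfl) r0.1
          (SoundE_weaken s r0.2 ih2 (fun a b hp => Or.inl hp))
      have hC1 : Coupled m1 := Coupled_insert_le r0.2 i j (by omega) r0.1 ih3
      have hG1 : Grows m m1 := Grows_trans ih4 (Grows_insert r0.2 (i, j) r0.1)
      have hRJ1 : Reach s m1 i (j - 1) := by
        by_cases hjj : 4 < j - 1 - i
        · exact Reach_mono s (Grows_insert r0.2 (i, j) r0.1) i (j - 1) (ih6 hjj).2.2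
        · exact Reach_of_le s m1 i (j - 1) (by omega)
      have aux : ∀ (l : List {x // x ∈ PySem.List.pyRange i (j - 4) 1}) (mc : pvMemo)
          (acc : Int × Option Int),
          mc.get? (i, j) = some acc.1 →
          mc.get? (j, i) = acc.2 →
          SoundE s mc P' → Coupled mc →
          (∀ t, acc.2 = some t → Reach s mc i (t - 1) ∧ Reach s mc (t + 1) (j - 1)) →
          Reach s mc i (j - 1) →
          (l.foldl (pvF s i j) mc).get? (i, j) = some (l.foldl (gSpec s i j) acc).1 ∧
          (l.foldl (pvF s i j) mc).get? (j, i) = (l.foldl (gSpec s i j) acc).2 ∧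
          SoundE s (l.foldl (pvF s i j) mc) P' ∧
          Coupled (l.foldl (pvF s i j) mc) ∧
          Grows mc (l.foldl (pvF s i j) mc) ∧
          (∀ a b : Int, ¬ (i ≤ a ∧ a ≤ j ∧ i ≤ b ∧ b ≤ j) →
            (l.foldl (pvF s i j) mc).get? (a, b) = mc.get? (a, b)) ∧
          (∀ t, (l.foldl (gSpec s i j) acc).2 = some t →
            Reach s (l.foldl (pvF s i j) mc) i (t - 1) ∧
            Reach s (l.foldl (pvF s i j) mc) (t + 1) (j - 1)) ∧
          Reach s (l.foldl (pvF s i j) mc) i (j - 1) := by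
        intro l
        induction l with
        | nil =>
          intro mc acc h1 h2 hSc hCc hRI hRJ
          exact ⟨h1, h2, hSc, hCc, Grows_refl mc, fun a b _ => rfl, hRI, hRJ⟩
        | cons tt rest ihl =>
          intro mc acc h1 h2 hSc hCc hRI hRJ
          simp only [List.foldl_cons]
          have httb := (PySem.List.mem_pyRange_one).1 tt.2
          by_cases hm : pvMatch s tt.1 j
          case neg =>
            have hgs : gSpec s i j acc tt = acc := by unfold gSpec; rw [if_neg hm]
            have hpf : pvF s i j mc tt = mc := by unfold pvF; rw [if_neg hm]
            rw [hgs, hpf]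
            exact ihl mc acc h1 h2 hSc hCc hRI hRJ
          case pos =>
            obtain ⟨a1, a2, a3, a4, a5, a6⟩ := IH i (tt.1 - 1) mc P' (by omega) hSc hCc
              (by
                intro a b hp ⟨x, y, z⟩
                rcases hp with hp | ⟨rfl, rfl⟩
                · exact hP a b hp ⟨x, by omega, z⟩
                · omega)
            set ra := computeOpt s i (tt.1 - 1) mc with hra
            obtain ⟨b1, b2, b3, b4, b5, b6⟩ := IH (tt.1 + 1) (j - 1) ra.2 P' (by omega) a2 a3
              (by
                intro a b hp ⟨x, y, z⟩
                rcases hp with hp | ⟨rfl, rfl⟩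
                · exact hP a b hp ⟨by omega, by omega, z⟩
                · omega)
            set rb := computeOpt s (tt.1 + 1) (j - 1) ra.2 with hrb
            have fij_a : ra.2.get? (i, j) = mc.get? (i, j) := a5 i j (by omega)
            have fji_a : ra.2.get? (j, i) = mc.get? (j, i) := a5 j i (by omega)
            have fij_b : rb.2.get? (i, j) = ra.2.get? (i, j) := b5 i j (by omega)
            have fji_b : rb.2.get? (j, i) = ra.2.get? (j, i) := b5 j i (by omega)
            have hcur : rb.2.get? (i, j) = some acc.1 := by rw [fij_b, fij_a, h1]
            have hcur2 : rb.2.get? (j, i) = acc.2 := by rw [fji_b, fji_a, h2]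
            have hgrow : Grows mc rb.2 := Grows_trans a4 b4
            have hRab : Reach s rb.2 i (tt.1 - 1) := by
              by_cases hx : 4 < tt.1 - 1 - i
              · exact Reach_mono s b4 i (tt.1 - 1) (a6 hx).2.2
              · exact Reach_of_le s rb.2 i (tt.1 - 1) (by omega)
            have hRbb : Reach s rb.2 (tt.1 + 1) (j - 1) := by
              by_cases hx : 4 < j - 1 - (tt.1 + 1)
              · exact (b6 hx).2.2
              · exact Reach_of_le s rb.2 (tt.1 + 1) (j - 1) (by omega)
            have hpf : pvF s i j mc tt =
                (if 1 + ra.1 + rb.1 > acc.1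
                 then (rb.2.insert (i, j) (1 + ra.1 + rb.1)).insert (j, i) tt.1 else rb.2) := by
              unfold pvF
              simp only [if_pos hm, ← hra, ← hrb, hcur]
            have hsc : 1 + (optR s i (tt.1 - 1)).1 + (optR s (tt.1 + 1) (j - 1)).1
                = 1 + ra.1 + rb.1 := by rw [a1, b1]
            have hgs : gSpec s i j acc tt =
                (if 1 + ra.1 + rb.1 > acc.1 then (1 + ra.1 + rb.1, some tt.1) else acc) := by
              unfold gSpec
              rw [if_pos hm, hsc]
            rw [hpf, hgs]
            by_cases hscore : 1 + ra.1 + rb.1 > acc.1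
            case pos =>
              rw [if_pos hscore, if_pos hscore]
              have hneij : ((i, j) : Int × Int) ≠ (j, i) := by
                intro he; injection he with e1 e2; omega
              set mc' := (rb.2.insert (i, j) (1 + ra.1 + rb.1)).insert (j, i) tt.1 with hmc'
              have g1 : Grows rb.2 mc' :=
                Grows_trans (Grows_insert _ _ _) (Grows_insert _ _ _)
              have h1' : mc'.get? (i, j) = some (1 + ra.1 + rb.1) := by
                rw [hmc', PySem.Dict.get?_insert_of_ne _ _ hneij]
                exact PySem.Dict.get?_insert_self _ _ _
              have h2' : mc'.get? (j, i) = some tt.1 := PySem.Dict.get?_insert_self _ _ _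
              have hS' : SoundE s mc' P' :=
                SoundE_insert s _ P' i j h4 hP'ij (j, i) (Or.inr rfl) tt.1
                  (SoundE_insert s _ P' i j h4 hP'ij (i, j) (Or.inl rfl) (1 + ra.1 + rb.1) b2)
              have hC' : Coupled mc' := by
                apply Coupled_insert_rev _ j i (by omega) tt.1
                · rw [PySem.Dict.get?_insert_self _ _ _]; rfl
                · exact Coupled_insert_le rb.2 i j (by omega) _ b3
              have hRI' : ∀ t, (some tt.1 : Option Int) = some t →
                  Reach s mc' i (t - 1) ∧ Reach s mc' (t + 1) (j - 1) := by
                intro t ht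
                injection ht with ht
                subst ht
                exact ⟨Reach_mono s g1 _ _ hRab, Reach_mono s g1 _ _ hRbb⟩
              have hRJ' : Reach s mc' i (j - 1) :=
                Reach_mono s (Grows_trans hgrow g1) i (j - 1) hRJ
              obtain ⟨c1, c2, c3, c4, c5, c6, c7, c8⟩ :=
                ihl mc' (1 + ra.1 + rb.1, some tt.1) h1' h2' hS' hC' hRI' hRJ'
              refine ⟨c1, c2, c3, c4, Grows_trans (Grows_trans hgrow g1) c5, ?_, c7, c8⟩
              intro a b hout
              have hne1 : ((a, b) : Int × Int) ≠ (j, i) := by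
                intro he; injection he with e1 e2; subst e1; subst e2; omega
              have hne2 : ((a, b) : Int × Int) ≠ (i, j) := by
                intro he; injection he with e1 e2; subst e1; subst e2; omega
              rw [c6 a b hout, hmc', PySem.Dict.get?_insert_of_ne _ _ hne1,
                PySem.Dict.get?_insert_of_ne _ _ hne2, b5 a b (by omega), a5 a b (by omega)]
            case neg =>
              rw [if_neg hscore, if_neg hscore]
              have hRI'' : ∀ t, acc.2 = some t →
                  Reach s rb.2 i (t - 1) ∧ Reach s rb.2 (t + 1) (j - 1) := by
                intro t ht
                obtain ⟨x, y⟩ := hRI t ht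
                exact ⟨Reach_mono s hgrow _ _ x, Reach_mono s hgrow _ _ y⟩
              have hRJ'' : Reach s rb.2 i (j - 1) := Reach_mono s hgrow i (j - 1) hRJ
              obtain ⟨c1, c2, c3, c4, c5, c6, c7, c8⟩ :=
                ihl rb.2 acc hcur hcur2 b2 b3 hRI'' hRJ''
              refine ⟨c1, c2, c3, c4, Grows_trans hgrow c5, ?_, c7, c8⟩
              intro a b hout
              rw [c6 a b hout, b5 a b (by omega), a5 a b (by omega)]
      rw [computeOpt_miss s i j m hb hget]
      rw [← hr0, ← hm1]
      obtain ⟨f1, f2, f3, f4, f5, f6, f7, f8⟩ :=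
        aux ((PySem.List.pyRange i (j - 4) 1).attach) m1 (r0.1, none) hm1ij hm1ji hS1 hC1
          (by intro t ht; exact absurd ht (by simp)) hRJ1
      have haccF : ((PySem.List.pyRange i (j - 4) 1).attach.foldl (gSpec s i j)
          ((r0.1, (none : Option Int)))) = optR s i j := by
        rw [optR_fold s i j hb, ih1]
      rw [haccF] at f1 f2 f7
      set mF := ((PySem.List.pyRange i (j - 4) 1).attach.foldl (pvF s i j) m1) with hmF
      have hReachF : Reach s mF i j := by
        rw [Reach]
        intro _
        refine ⟨by rw [f1]; rfl, f7, ?_⟩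
        intro _
        exact f8
      refine ⟨?_, ?_, f4, Grows_trans hG1 f5, ?_, fun _ => ⟨f1, f2, hReachF⟩⟩
      · simp only [PySem.Dict.getD_eq_get?_getD, f1, Option.getD_some]
      · intro a b hb4 hPab hsome
        by_cases hab : (a, b) = ((i, j) : Int × Int)
        · injection hab with e1 e2; subst e1; subst e2
          exact ⟨f1, f2, hReachF⟩
        · exact f3 a b hb4 (by
            intro hp
            rcases hp with hp | ⟨rfl, rfl⟩
            · exact hPab hp
            · exact hab rfl) hsome
      · intro a b hout
        have hne2 : ((a, b) : Int × Int) ≠ (i, j) := by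
          intro he; injection he with e1 e2; subst e1; subst e2; omega
        rw [f6 a b hout, hm1, PySem.Dict.get?_insert_of_ne _ _ hne2, ih5 a b (by omega)]

-- ===== B-side tables =====
def TabP (s : List Char) (vd sd : pvMemo) (n L i0 : Int) : Prop :=
  (∀ a b : Int, vd.get? (a, b) =
    if 0 ≤ a ∧ b < n ∧ 4 < b - a ∧ (b - a < L ∨ (b - a = L ∧ a < i0))
    then some (optR s a b).1 else none) ∧
  (∀ a b : Int, sd.get? (a, b) =
    if 0 ≤ a ∧ b < n ∧ 4 < b - a ∧ (b - a < L ∨ (b - a = L ∧ a < i0))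
    then (optR s a b).2 else none)

def TabF (s : List Char) (vd sd : pvMemo) (n : Int) : Prop :=
  (∀ a b : Int, vd.get? (a, b) =
    if 0 ≤ a ∧ b < n ∧ 4 < b - a then some (optR s a b).1 else none) ∧
  (∀ a b : Int, sd.get? (a, b) =
    if 0 ≤ a ∧ b < n ∧ 4 < b - a then (optR s a b).2 else none)

-- optR's fold over the plain range list
theorem optR_fold' (s : List Char) (i j : Int) (h : ¬ j - i ≤ 4) :
    optR s i j = (PySem.List.pyRange i (j - 4) 1).foldl
      (fun (acc : Int × Option Int) t =>
        if pvMatch s t j then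
          (if 1 + (optR s i (t - 1)).1 + (optR s (t + 1) (j - 1)).1 > acc.1
           then (1 + (optR s i (t - 1)).1 + (optR s (t + 1) (j - 1)).1, some t) else acc)
        else acc)
      ((optR s i (j - 1)).1, none) := by
  rw [optR_fold s i j h]
  exact List.foldl_attach
    (f := fun (acc : Int × Option Int) t =>
      if pvMatch s t j then
        (if 1 + (optR s i (t - 1)).1 + (optR s (t + 1) (j - 1)).1 > acc.1
         then (1 + (optR s i (t - 1)).1 + (optR s (t + 1) (j - 1)).1, some t) else acc)
      else acc)

-- the inner (per-start-index) step of pvTables, named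
def pvRow (s : List Char) (L : Int) : (pvMemo × pvMemo) → Int → (pvMemo × pvMemo) :=
  fun tabs i =>
    let j := i + L
    let bs := (PySem.List.pyRange i (j - 4) 1).foldl
      (fun (acc : Int × Option Int) t =>
        if pvMatch s t j then
          let score := 1 + tabs.1.getD (i, t - 1) 0 + tabs.1.getD (t + 1, j - 1) 0
          if score > acc.1 then (score, some t) else acc
        else acc)
      (tabs.1.getD (i, j - 1) 0, (none : Option Int))
    (tabs.1.insert (i, j) bs.1,
     match bs.2 with
     | some t => tabs.2.insert (i, j) t
     | none => tabs.2)

theorem pvTables_eq (s : List Char) (n : Int) :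
    pvTables s n = (PySem.List.pyRange 5 n 1).foldl
      (fun tabs L => (PySem.List.pyRange 0 (n - L) 1).foldl (pvRow s L) tabs)
      (PySem.Dict.empty, PySem.Dict.empty) := rfl

theorem tab_getD (s : List Char) (vd : pvMemo) (n L i0 : Int)
    (hv : ∀ a b : Int, vd.get? (a, b) =
      if 0 ≤ a ∧ b < n ∧ 4 < b - a ∧ (b - a < L ∨ (b - a = L ∧ a < i0))
      then some (optR s a b).1 else none)
    (a b : Int) (ha : 0 ≤ a) (hbn : b < n) (hlt : b - a < L) :
    vd.getD (a, b) 0 = (optR s a b).1 := by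
  rw [PySem.Dict.getD_eq_get?_getD, hv a b]
  by_cases h4 : 4 < b - a
  · rw [if_pos ⟨ha, hbn, h4, Or.inl hlt⟩]; rfl
  · rw [if_neg (by omega), optR_base s a b (by omega)]; rfl

theorem row_step (s : List Char) (n L i0 : Int) (vd sd : pvMemo)
    (hT : TabP s vd sd n L i0) (hL : 5 ≤ L) (hi0 : 0 ≤ i0) (hin : i0 < n - L) :
    TabP s (pvRow s L (vd, sd) i0).1 (pvRow s L (vd, sd) i0).2 n L (i0 + 1) := by
  obtain ⟨hv, hs⟩ := hT
  have hbase : ¬ (i0 + L) - i0 ≤ 4 := by omega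
  have hfold : ((PySem.List.pyRange i0 (i0 + L - 4) 1).foldl
      (fun (acc : Int × Option Int) t =>
        if pvMatch s t (i0 + L) then
          let score := 1 + vd.getD (i0, t - 1) 0 + vd.getD (t + 1, i0 + L - 1) 0
          if score > acc.1 then (score, some t) else acc
        else acc)
      (vd.getD (i0, i0 + L - 1) 0, (none : Option Int))) = optR s i0 (i0 + L) := by
    rw [optR_fold' s i0 (i0 + L) hbase]
    have hinit : vd.getD (i0, i0 + L - 1) 0 = (optR s i0 (i0 + L - 1)).1 :=
      tab_getD s vd n L i0 hv i0 (i0 + L - 1) hi0 (by omega) (by omega)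
    have harg : i0 + L - 4 = (i0 + L) - 4 := by omega
    rw [hinit, harg]
    apply PySem.List.foldl_congr_mem
    intro acc t ht
    have htb := (PySem.List.mem_pyRange_one).1 ht
    by_cases hm : pvMatch s t (i0 + L)
    · simp only [if_pos hm]
      rw [tab_getD s vd n L i0 hv i0 (t - 1) hi0 (by omega) (by omega),
        tab_getD s vd n L i0 hv (t + 1) (i0 + L - 1) (by omega) (by omega) (by omega)]
    · simp only [if_neg hm]
  have hrow : pvRow s L (vd, sd) i0 =
      (vd.insert (i0, i0 + L) (optR s i0 (i0 + L)).1,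
       match (optR s i0 (i0 + L)).2 with
       | some t => sd.insert (i0, i0 + L) t
       | none => sd) := by
    show ((vd.insert (i0, i0 + L)
        ((PySem.List.pyRange i0 (i0 + L - 4) 1).foldl
          (fun (acc : Int × Option Int) t =>
            if pvMatch s t (i0 + L) then
              let score := 1 + vd.getD (i0, t - 1) 0 + vd.getD (t + 1, i0 + L - 1) 0
              if score > acc.1 then (score, some t) else acc
            else acc)
          (vd.getD (i0, i0 + L - 1) 0, (none : Option Int))).1,
        match ((PySem.List.pyRange i0 (i0 + L - 4) 1).foldl
          (fun (acc : Int × Option Int) t =>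
            if pvMatch s t (i0 + L) then
              let score := 1 + vd.getD (i0, t - 1) 0 + vd.getD (t + 1, i0 + L - 1) 0
              if score > acc.1 then (score, some t) else acc
            else acc)
          (vd.getD (i0, i0 + L - 1) 0, (none : Option Int))).2 with
        | some t => sd.insert (i0, i0 + L) t
        | none => sd) : pvMemo × pvMemo) = _
    rw [hfold]
  have hrow1 : (pvRow s L (vd, sd) i0).1 = vd.insert (i0, i0 + L) (optR s i0 (i0 + L)).1 := by
    rw [hrow]
  have hrow2 : (pvRow s L (vd, sd) i0).2 =
      (match (optR s i0 (i0 + L)).2 with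
       | some t => sd.insert (i0, i0 + L) t
       | none => sd) := by
    rw [hrow]
  constructor
  · intro a b
    rw [hrow1]
    by_cases hab : ((a, b) : Int × Int) = (i0, i0 + L)
    · injection hab with e1 e2; subst e1; subst e2
      rw [PySem.Dict.get?_insert_self _ _ _,
        if_pos ⟨hi0, by omega, by omega, Or.inr ⟨by omega, by omega⟩⟩]
    · rw [PySem.Dict.get?_insert_of_ne _ _ hab, hv a b]
      have hne : ¬ (a = i0 ∧ b = i0 + L) := by
        intro ⟨e1, e2⟩; exact hab (by rw [e1, e2])
      exact if_congr (by omega) rfl rfl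
  · intro a b
    rw [hrow2]
    by_cases hab : ((a, b) : Int × Int) = (i0, i0 + L)
    · injection hab with e1 e2
      rw [e1, e2]
      rw [if_pos ⟨hi0, by omega, by omega, Or.inr ⟨by omega, by omega⟩⟩]
      cases h2 : (optR s i0 (i0 + L)).2 with
      | some t => exact PySem.Dict.get?_insert_self _ _ _
      | none => rw [hs i0 (i0 + L), if_neg (by omega)]
    · have hne : ¬ (a = i0 ∧ b = i0 + L) := by
        intro ⟨e1, e2⟩; exact hab (by rw [e1, e2])
      have hrest : sd.get? (a, b) =
          (if 0 ≤ a ∧ b < n ∧ 4 < b - a ∧ (b - a < L ∨ (b - a = L ∧ a < i0 + 1))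
           then (optR s a b).2 else none) := by
        rw [hs a b]; exact if_congr (by omega) rfl rfl
      cases h2 : (optR s i0 (i0 + L)).2 with
      | some t => rw [PySem.Dict.get?_insert_of_ne _ _ hab]; exact hrest
      | none => exact hrest

theorem row_tab (s : List Char) (n L : Int) (hL : 5 ≤ L) :
    ∀ (k : Nat) (i0 : Int) (vd sd : pvMemo), (n - L - i0).toNat = k → 0 ≤ i0 →
    TabP s vd sd n L i0 →
    TabP s ((PySem.List.pyRange i0 (n - L) 1).foldl (pvRow s L) (vd, sd)).1
           ((PySem.List.pyRange i0 (n - L) 1).foldl (pvRow s L) (vd, sd)).2 n (L + 1) 0 := by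
  intro k
  induction k with
  | zero =>
    intro i0 vd sd hk hi0 hT
    rw [PySem.List.pyRange_one_eq_nil (by omega), List.foldl_nil]
    obtain ⟨hv, hs⟩ := hT
    exact ⟨fun a b => by rw [hv a b]; exact if_congr (by omega) rfl rfl,
           fun a b => by rw [hs a b]; exact if_congr (by omega) rfl rfl⟩
  | succ k ih =>
    intro i0 vd sd hk hi0 hT
    rw [PySem.List.pyRange_one_cons (by omega), List.foldl_cons]
    exact ih (i0 + 1) (pvRow s L (vd, sd) i0).1 (pvRow s L (vd, sd) i0).2 (by omega) (by omega)
      (row_step s n L i0 vd sd hT hL hi0 (by omega))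

theorem outer_tab (s : List Char) (n : Int) :
    ∀ (k : Nat) (L0 : Int) (vd sd : pvMemo), (n - L0).toNat = k → 5 ≤ L0 →
    TabP s vd sd n L0 0 →
    TabF s ((PySem.List.pyRange L0 n 1).foldl
              (fun tabs L => (PySem.List.pyRange 0 (n - L) 1).foldl (pvRow s L) tabs) (vd, sd)).1
           ((PySem.List.pyRange L0 n 1).foldl
              (fun tabs L => (PySem.List.pyRange 0 (n - L) 1).foldl (pvRow s L) tabs) (vd, sd)).2
           n := by
  intro k
  induction k with
  | zero =>
    intro L0 vd sd hk hL0 hT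
    rw [PySem.List.pyRange_one_eq_nil (by omega), List.foldl_nil]
    obtain ⟨hv, hs⟩ := hT
    exact ⟨fun a b => by rw [hv a b]; exact if_congr (by omega) rfl rfl,
           fun a b => by rw [hs a b]; exact if_congr (by omega) rfl rfl⟩
  | succ k ih =>
    intro L0 vd sd hk hL0 hT
    rw [PySem.List.pyRange_one_cons (by omega), List.foldl_cons]
    have hrow := row_tab s n L0 hL0 ((n - L0 - 0).toNat) 0 vd sd rfl le_rfl hT
    exact ih (L0 + 1) _ _ (by omega) (by omega) hrow

theorem pvTables_tab (s : List Char) (n : Int) :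
    TabF s (pvTables s n).1 (pvTables s n).2 n := by
  rw [pvTables_eq]
  apply outer_tab s n ((n - 5).toNat) 5 PySem.Dict.empty PySem.Dict.empty rfl (by omega)
  constructor
  · intro a b
    rw [PySem.Dict.get?_empty, if_neg (by omega)]
  · intro a b
    rw [PySem.Dict.get?_empty, if_neg (by omega)]

theorem traceback_eq (s : List Char) (n : Int) (M sd : pvMemo)
    (hM : SoundE s M (fun _ _ => False))
    (hsd : ∀ a b : Int, sd.get? (a, b) =
      if 0 ≤ a ∧ b < n ∧ 4 < b - a then (optR s a b).2 else none) :
    ∀ (fuel : Nat) (i j : Int), 0 ≤ i → j < n → (4 < j - i → Reach s M i j) →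
      getPairsA M fuel i j = getPairsB sd fuel i j := by
  intro fuel
  induction fuel with
  | zero => intro i j _ _ _; rfl
  | succ fuel ih =>
    intro i j hi hj hR
    by_cases hb : j - i ≤ 4
    · simp [getPairsA, getPairsB, hb]
    · have h4 : 4 < j - i := by omega
      have hRij := hR h4
      rw [Reach] at hRij
      obtain ⟨hsome, hsp, hnn⟩ := hRij h4
      obtain ⟨hval, hspl, _⟩ := hM i j h4 not_false hsome
      have hsd' : sd.get? (i, j) = (optR s i j).2 := by
        rw [hsd i j, if_pos ⟨hi, hj, h4⟩]
      cases hsp2 : (optR s i j).2 with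
      | some t =>
        have hbt := optR_split_mem s i j t hsp2
        obtain ⟨x, y⟩ := hsp t hsp2
        rw [hsp2] at hspl hsd'
        simp only [getPairsA, getPairsB, if_neg hb, hval, hspl, hsd']
        rw [ih i (t - 1) hi (by omega) (fun _ => x),
          ih (t + 1) (j - 1) (by omega) (by omega) (fun _ => y)]
      | none =>
        rw [hsp2] at hspl hsd'
        simp only [getPairsA, getPairsB, if_neg hb, hval, hspl, hsd']
        exact ih i (j - 1) hi (by omega) (fun _ => hnn hsp2)

-- ===== VERDICT (by name: the statement is the Claim_ definition above) =====
theorem empty_SoundE (s : List Char) : SoundE s PySem.Dict.empty (fun _ _ => False) := by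
  intro a b _ _ hsome
  rw [PySem.Dict.get?_empty] at hsome
  exact absurd hsome (by simp)

theorem empty_Coupled : Coupled (PySem.Dict.empty : pvMemo) := by
  intro a b _ hsome
  rw [PySem.Dict.get?_empty] at hsome
  exact absurd hsome (by simp)

theorem rna_folding_spec : Claim_equal_rna_folding := by
  unfold Claim_equal_rna_folding
  intro seq _ _
  unfold Spec_rna_folding rna_folding rna_folding_alt
  simp only [PySem.List.len_eq]
  set s := seq.toList with hsdef
  set n : Int := (s.length : Int) with hn
  obtain ⟨m1c, m2c, m3c, m4c, m5c, m6c⟩ :=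
    computeOpt_correct s ((n - 1 - 0).toNat) 0 (n - 1) PySem.Dict.empty (fun _ _ => False)
      le_rfl (empty_SoundE s) empty_Coupled (fun a b f => f.elim)
  obtain ⟨hTv, hTs⟩ := pvTables_tab s n
  have hn0 : 0 ≤ n := by rw [hn]; exact_mod_cast Nat.zero_le _
  refine Prod.ext ?_ ?_
  · show getPairsA (computeOpt s 0 (n - 1) PySem.Dict.empty).2 (s.length + 1) 0 (n - 1)
        = getPairsB (pvTables s n).2 (s.length + 1) 0 (n - 1)
    by_cases h4 : 4 < n - 1 - 0
    · exact traceback_eq s n (computeOpt s 0 (n - 1) PySem.Dict.empty).2 (pvTables s n).2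
        m2c hTs (s.length + 1) 0 (n - 1) le_rfl (by omega) (fun _ => (m6c (by omega)).2.2)
    · simp [getPairsA, getPairsB, show (n : Int) ≤ 5 by omega]
  · show (computeOpt s 0 (n - 1) PySem.Dict.empty).2.get? (0, n - 1)
        = (pvTables s n).1.get? (0, n - 1)
    by_cases h4 : 4 < n - 1 - 0
    · rw [(m6c (by omega)).1, hTv 0 (n - 1), if_pos ⟨le_rfl, by omega, by omega⟩]
    · rw [computeOpt_base s 0 (n - 1) PySem.Dict.empty (by omega),
        hTv 0 (n - 1), if_neg (by omega)]
      exact PySem.Dict.get?_empty _
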